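-- pv_equiv track=rewrite | github.com/cppalliance/boost-data-collector | boost_usage_tracker/boost_searcher.py | _build_boost_include_query
-- ===== SOURCE A (Python) =====
-- MAX_CODE_SEARCH_QUERY_LEN = 255
--
-- BOOST_INCLUDE_SEARCH_BATCH_SIZE = 5
--
-- def _build_boost_include_query(repo_full_names: list[str]) -> tuple[str, list[str]]:
--     base = '"#include <boost/" language:C++ '
--     if not repo_full_names:
--         return base, []
--     repos = repo_full_names[:BOOST_INCLUDE_SEARCH_BATCH_SIZE]
--     parts = [f"repo:{name}" for name in repos]
--     query = base + " ".join(parts)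
--     while len(query) > MAX_CODE_SEARCH_QUERY_LEN and len(repos) > 1:
--         repos = repos[:-1]
--         parts = [f"repo:{name}" for name in repos]
--         query = base + " ".join(parts)
--     return query, repos
-- ===== SOURCE B (Python) =====
-- MAX_CODE_SEARCH_QUERY_LEN = 255
--
-- BOOST_INCLUDE_SEARCH_BATCH_SIZE = 5
--
-- def _build_boost_include_query(repo_full_names: list[str]) -> tuple[str, list[str]]:
--     base = '"#include <boost/" language:C++ '
--     if not repo_full_names:
--         return base, []
--     # Always commit the first repo, so at least one repo is kept even over the limit.
--     query = base + f"repo:{repo_full_names[0]}"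
--     kept = [repo_full_names[0]]
--     for name in repo_full_names[1:BOOST_INCLUDE_SEARCH_BATCH_SIZE]:
--         cand = query + f" repo:{name}"
--         if len(cand) > MAX_CODE_SEARCH_QUERY_LEN:
--             break
--         query = cand
--         kept.append(name)
--     return query, kept
-- ===== Notes on version B (the rewrite author's own statement) =====
-- stated objective: simpler
-- what changed: B grows the query forward — commit the first repo, then greedily append each next 'repo:' clause while the total length stays within the limit — instead of A's building all five parts and repeatedly rebuilding the whole query while trimming repos from the end.
import Mathlib
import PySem

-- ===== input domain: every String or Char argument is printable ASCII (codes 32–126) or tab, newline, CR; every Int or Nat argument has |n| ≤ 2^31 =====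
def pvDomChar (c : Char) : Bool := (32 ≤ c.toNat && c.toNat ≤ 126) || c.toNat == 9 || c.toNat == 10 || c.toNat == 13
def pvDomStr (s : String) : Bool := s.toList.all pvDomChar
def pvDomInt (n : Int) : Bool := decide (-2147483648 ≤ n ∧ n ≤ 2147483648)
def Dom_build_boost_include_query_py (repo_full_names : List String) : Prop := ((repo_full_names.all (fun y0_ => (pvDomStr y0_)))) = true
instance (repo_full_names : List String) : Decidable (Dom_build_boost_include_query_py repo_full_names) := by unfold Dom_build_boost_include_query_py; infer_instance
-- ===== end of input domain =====

-- B builds the query incrementally (commit the first repo, then greedily append each next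
-- "repo:" clause while the total stays within the limit) instead of A's
-- build-all-five-then-retrim-from-the-end loop; objective: simpler.

-- ===== PORT A =====
-- A's while loop: rebuild parts and query from repos, dropping the last repo while too long
def pvAShrink (repos : List String) : String × List String :=
  let parts := repos.map (fun name => "repo:" ++ name)
  let query := "\"#include <boost/\" language:C++ " ++ PySem.Str.join " " parts
  if 255 < PySem.Str.len query ∧ 1 < PySem.List.len repos then
    pvAShrink (PySem.List.slice repos none (some (-1)))
  else
    (query, repos)
termination_by repos.length
decreasing_by
  rename_i h
  rw [PySem.List.slice_to_neg_one]
  have := @List.length_dropLast _ repos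
  simp [PySem.List.len_eq] at h
  omega

def build_boost_include_query_py (repo_full_names : List String) : String × List String :=
  let base := "\"#include <boost/\" language:C++ "
  if repo_full_names = [] then (base, [])
  else pvAShrink (PySem.List.slice repo_full_names none (some 5))

-- ===== PORT B =====
-- B's for loop: tentatively append " repo:{name}", break at the first candidate over the limit
def pvBGrow (names : List String) (query : String) (kept : List String) : String × List String :=
  match names with
  | [] => (query, kept)
  | name :: rest =>
    let cand := query ++ (" repo:" ++ name)
    if 255 < PySem.Str.len cand then (query, kept)
    else pvBGrow rest cand (kept ++ [name])

def build_boost_include_query_py_alt (repo_full_names : List String) : String × List String :=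
  let base := "\"#include <boost/\" language:C++ "
  match repo_full_names with
  | [] => (base, [])
  | first :: _ =>
    pvBGrow (PySem.List.slice repo_full_names (some 1) (some 5))
      (base ++ ("repo:" ++ first)) [first]

-- ===== PRECONDITION & SPEC =====
def Spec_build_boost_include_query_py (repo_full_names : List String) (out : String × List String) : Prop := out = build_boost_include_query_py_alt repo_full_names
instance (repo_full_names : List String) (out : String × List String) : Decidable (Spec_build_boost_include_query_py repo_full_names out) := by unfold Spec_build_boost_include_query_py; infer_instance

-- ===== CLAIM (what is proved, stated in full; the proofs are below) =====
def Claim_equal_build_boost_include_query_py : Prop := ∀ (repo_full_names : List String), Dom_build_boost_include_query_py repo_full_names → Spec_build_boost_include_query_py repo_full_names (build_boost_include_query_py repo_full_names)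

-- ===== LEMMAS AND PROOFS =====

-- B's accumulated query after appending every name of `names` to `s`
def gAll (s : String) (names : List String) : String :=
  names.foldl (fun t n => t ++ (" repo:" ++ n)) s

lemma strjoin_singleton (p : String) : PySem.Str.join " " [p] = p :=
  String.toList_inj.mp (by simp [PySem.Str.toList_join, PySem.Chars.join_singleton])

lemma strjoin_cons (p q : String) (rest : List String) :
    PySem.Str.join " " (p::q::rest) = p ++ (" " ++ PySem.Str.join " " (q::rest)) :=
  String.toList_inj.mp (by simp [PySem.Str.toList_join, PySem.Chars.join_cons_cons])

lemma spchars : (" repo:" : String).toList = " ".toList ++ "repo:".toList := by decide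

lemma gAll_cons (s a : String) (r : List String) :
    gAll s (a :: r) = gAll (s ++ (" repo:" ++ a)) r := rfl

lemma len_le_gAll (names : List String) : ∀ s : String, PySem.Str.len s ≤ PySem.Str.len (gAll s names) := by
  induction names with
  | nil => intro s; simp [gAll]
  | cons m ms ih =>
    intro s
    rw [gAll_cons]
    refine le_trans ?_ (ih _)
    have h1 : 0 ≤ PySem.Str.len (" repo:" ++ m) := by simp [PySem.Str.len_eq]; omega
    rw [PySem.Str.len_append]; omega

-- A's query over the batch f :: r equals B's accumulated query after appending all of r
lemma JQ (r : List String) : ∀ s f : String,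
    s ++ PySem.Str.join " " (("repo:" ++ f) :: r.map (fun n => "repo:" ++ n)) = gAll (s ++ ("repo:" ++ f)) r := by
  induction r with
  | nil => intro s f; simp only [List.map_nil]; rw [strjoin_singleton]; rfl
  | cons a r' ih =>
    intro s f
    rw [List.map_cons, strjoin_cons, gAll_cons]
    have harg : s ++ ("repo:" ++ f) ++ (" repo:" ++ a)
        = (s ++ ("repo:" ++ f) ++ " ") ++ ("repo:" ++ a) :=
      String.toList_inj.mp (by simp [spchars])
    rw [harg, ← ih (s ++ ("repo:" ++ f) ++ " ") a]
    apply String.toList_inj.mp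
    simp

-- if the full query overflows, B never reaches the last name
lemma growM (names : List String) : ∀ (q : String) (kept : List String) (n : String),
    255 < PySem.Str.len (gAll q (names ++ [n])) →
    pvBGrow (names ++ [n]) q kept = pvBGrow names q kept := by
  induction names with
  | nil =>
    intro q kept n h
    simp only [List.nil_append, pvBGrow]
    rw [if_pos (by simpa [gAll] using h)]
  | cons m ms ih =>
    intro q kept n h
    simp only [List.cons_append, pvBGrow]
    by_cases hm : 255 < PySem.Str.len (q ++ (" repo:" ++ m))
    · rw [if_pos hm, if_pos hm]
    · rw [if_neg hm, if_neg hm]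
      exact ih _ _ _ (by rwa [List.cons_append, gAll_cons] at h)

-- if the full query fits, B keeps every name
lemma growN (names : List String) : ∀ (q : String) (kept : List String),
    ¬ 255 < PySem.Str.len (gAll q names) →
    pvBGrow names q kept = (gAll q names, kept ++ names) := by
  induction names with
  | nil => intro q kept _; simp [pvBGrow, gAll]
  | cons m ms ih =>
    intro q kept h
    rw [gAll_cons] at h
    have hc : ¬ 255 < PySem.Str.len (q ++ (" repo:" ++ m)) := by
      have := len_le_gAll ms (q ++ (" repo:" ++ m)); omega
    simp only [pvBGrow]
    rw [if_neg hc, ih _ _ h, gAll_cons]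
    simp

-- the core equivalence: A's trim-from-the-end loop = B's grow-forward loop on any batch f :: r
lemma shrink_eq_grow (f : String) (r : List String) :
    pvAShrink (f :: r) = pvBGrow r ("\"#include <boost/\" language:C++ " ++ ("repo:" ++ f)) [f] := by
  induction r using List.reverseRecOn with
  | nil => rw [pvAShrink]; simp [PySem.List.len_eq, strjoin_singleton, pvBGrow]
  | append_singleton r' last ih =>
    rw [pvAShrink, PySem.List.slice_to_neg_one]
    simp only [List.map_cons, JQ, PySem.List.len_eq]
    have hlen : (1 : Int) < ((f :: (r' ++ [last])).length : Int) := by simp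
    have hdrop : (f :: (r' ++ [last])).dropLast = f :: r' := by
      rw [← List.cons_append, List.dropLast_concat]
    by_cases h : 255 < PySem.Str.len (gAll ("\"#include <boost/\" language:C++ " ++ ("repo:" ++ f)) (r' ++ [last]))
    · rw [if_pos ⟨h, hlen⟩, hdrop, ih, growM _ _ _ _ h]
    · rw [if_neg (by tauto), growN _ _ _ h]
      simp

lemma slice_one_five (x : String) (xs : List String) :
    PySem.List.slice (x::xs) (some 1) (some 5) = xs.take 4 := by
  simp only [PySem.List.slice, Nat.ofNat_nonneg, PySem.List.clampIdx_of_nonneg, Int.reduceToNat,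
    zero_le_one, Int.toNat_one]
  simp
  omega

lemma slice_five (xs : List String) : PySem.List.slice xs none (some 5) = xs.take 5 := by
  rw [PySem.List.slice_to xs (by norm_num)]; rfl

-- ===== VERDICT (by name: the statement is the Claim_ definition above) =====
theorem build_boost_include_query_py_spec : Claim_equal_build_boost_include_query_py := by
  intro xs _
  show _ = _
  unfold build_boost_include_query_py build_boost_include_query_py_alt
  match xs with
  | [] => rfl
  | f :: rest =>
    simp only [reduceCtorEq, if_false, slice_one_five, slice_five, List.take_succ_cons]
    exact shrink_eq_grow f (rest.take 4)
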